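-- pv_equiv track=rewrite | github.com/Mel-Ja/IP | practica8.py | obtener_lu_unico
-- ===== SOURCE A (Python) =====
-- def tokenizar_linea_csv(linea: str) -> list[str]:
--     tokens: list[str] = []
--     token_actual: str = ""
--
--     delimitadores: list[str] = [",", "\n"]
--
--     for caracter in linea:
--         if caracter not in delimitadores:
--             token_actual += caracter
--         else:
--             tokens.append(token_actual)
--             token_actual = ""
--     if token_actual != "":
--         tokens.append(token_actual)
--
--     return tokens
--
-- def obtener_lu_unico(lineas: list[str]) -> list[str]:
--     lus_unicos: list[str] = []
--     for linea in lineas: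
--         datos: list[str] = tokenizar_linea_csv(linea)
--         if len(datos) > 0:
--             lu_actual: str = datos[0]
--             if lu_actual not in lus_unicos:
--                 lus_unicos.append(lu_actual)
--
--     return lus_unicos
-- ===== SOURCE B (Python) =====
-- def obtener_lu_unico(lineas: list[str]) -> list[str]:
--     # Simpler: extract only the first CSV field per non-empty line (no full tokenizer),
--     # dedup in first-seen order with a set.
--     vistos: set[str] = set()
--     unicos: list[str] = []
--     for linea in lineas:
--         if linea == "":
--             continue
--         corte = len(linea)
--         i = linea.find(",")
--         if i != -1:
--             corte = i
--         j = linea.find("\n")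
--         if j != -1 and j < corte:
--             corte = j
--         campo = linea[:corte]
--         if campo not in vistos:
--             vistos.add(campo)
--             unicos.append(campo)
--     return unicos
-- ===== Notes on version B (the rewrite author's own statement) =====
-- stated objective: faster
-- what changed: B drops the full line tokenizer: it slices each non-empty line at the earliest ',' or '\n' (via str.find) to get just the first field, and replaces A's linear 'not in' scan of the output list by a seen-set.
import Mathlib
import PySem

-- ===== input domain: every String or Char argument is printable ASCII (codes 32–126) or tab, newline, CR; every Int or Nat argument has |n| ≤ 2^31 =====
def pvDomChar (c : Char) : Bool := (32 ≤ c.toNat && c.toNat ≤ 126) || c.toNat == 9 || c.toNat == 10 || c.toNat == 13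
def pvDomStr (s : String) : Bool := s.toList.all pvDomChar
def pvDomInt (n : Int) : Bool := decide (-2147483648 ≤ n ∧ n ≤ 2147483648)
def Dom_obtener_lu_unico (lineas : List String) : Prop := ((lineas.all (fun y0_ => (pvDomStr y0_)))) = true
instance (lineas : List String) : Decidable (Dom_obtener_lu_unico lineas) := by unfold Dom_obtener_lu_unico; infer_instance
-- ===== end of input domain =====

-- B slices each non-empty line at the earliest ',' or '\n' instead of running A's full tokenizer,
-- and dedups with a seen-set instead of A's linear scan of the output list (measured faster).

-- ===== PORT A =====
def tokenizar_linea_csv (linea : String) : List String :=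
  let delimitadores : List Char := [',', '\n']
  let st := linea.toList.foldl
    (fun (st : List String × String) caracter =>
      if caracter ∉ delimitadores then (st.1, st.2.push caracter)
      else (st.1 ++ [st.2], ""))
    ([], "")
  if st.2 ≠ "" then st.1 ++ [st.2] else st.1

def obtener_lu_unico (lineas : List String) : List String :=
  lineas.foldl
    (fun lus_unicos linea =>
      let datos := tokenizar_linea_csv linea
      if datos.length > 0 then
        let lu_actual := PySem.List.pyGetD datos 0 ""
        if lu_actual ∉ lus_unicos then lus_unicos ++ [lu_actual] else lus_unicos
      else lus_unicos)
    []

-- ===== PORT B =====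
def primer_campo (linea : String) : String :=
  let corte := PySem.Str.len linea
  let i := PySem.Str.find linea ","
  let corte := if i ≠ -1 then i else corte
  let j := PySem.Str.find linea "\n"
  let corte := if j ≠ -1 ∧ j < corte then j else corte
  PySem.Str.slice linea none (some corte)

def obtener_lu_unico_alt (lineas : List String) : List String :=
  (lineas.foldl
    (fun (st : PySem.Set String × List String) linea =>
      if linea = "" then st
      else
        let campo := primer_campo linea
        if !st.1.contains campo then (st.1.add campo, st.2 ++ [campo]) else st)
    (PySem.Set.ofList [], [])).2

-- ===== PRECONDITION & SPEC =====
def Spec_obtener_lu_unico (lineas : List String) (out : List String) : Prop := out = obtener_lu_unico_alt lineas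
instance (lineas : List String) (out : List String) : Decidable (Spec_obtener_lu_unico lineas out) := by unfold Spec_obtener_lu_unico; infer_instance

-- ===== CLAIM (what is proved, stated in full; the proofs are below) =====
def Claim_equal_obtener_lu_unico : Prop := ∀ (lineas : List String), Dom_obtener_lu_unico lineas → Spec_obtener_lu_unico lineas (obtener_lu_unico lineas)

-- ===== LEMMAS AND PROOFS =====

-- character predicates: ndCh = "not a delimiter", delimCh its negation
def delimCh (c : Char) : Bool := c == ',' || c == '\n'
def ndCh (c : Char) : Bool := !delimCh c

-- A's inner fold, named for the lemmas
def tokStep (st : List String × String) (caracter : Char) : List String × String :=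
  if caracter ∉ [',', '\n'] then (st.1, st.2.push caracter)
  else (st.1 ++ [st.2], "")

theorem tokenizar_eq (linea : String) :
    tokenizar_linea_csv linea =
      (let st := linea.toList.foldl tokStep ([], "");
       if st.2 ≠ "" then st.1 ++ [st.2] else st.1) := rfl

-- the tokens component only grows on the right
theorem tokStep_mono (cs : List Char) (toks : List String) (cur : String) :
    ∃ ts c', cs.foldl tokStep (toks, cur) = (toks ++ ts, c') := by
  induction cs generalizing toks cur with
  | nil => exact ⟨[], cur, by simp⟩
  | cons x xs ih =>
    simp only [List.foldl_cons, tokStep]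
    split
    · exact ih toks (cur.push x)
    · obtain ⟨ts, c', h⟩ := ih (toks ++ [cur]) ""
      exact ⟨[cur] ++ ts, c', by simpa using h⟩

-- head of the finished token list, for a non-empty character list
theorem tok_first (cs : List Char) (cur : String) (h : cs ≠ []) :
    (let st := cs.foldl tokStep ([], cur);
     if st.2 ≠ "" then st.1 ++ [st.2] else st.1).head? =
      some (String.ofList (cur.toList ++ cs.takeWhile ndCh)) := by
  induction cs generalizing cur with
  | nil => exact absurd rfl h
  | cons x xs ih =>
    by_cases hx : ndCh x
    · have hmem : x ∉ [',', '\n'] := by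
        simp only [ndCh, delimCh] at hx
        simp_all
      have hstep : tokStep ([], cur) x = ([], cur.push x) := by
        simp only [tokStep]
        rw [if_pos hmem]
      cases xs with
      | nil =>
        have hne : cur.push x ≠ "" := by
          intro hc
          have := congrArg String.toList hc
          simp [String.toList_push] at this
        have hofl : String.ofList (cur.toList ++ List.takeWhile ndCh [x]) = cur.push x := by
          apply String.toList_inj.mp
          simp [hx, String.toList_push]
        simp only [List.foldl_cons, List.foldl_nil, hstep]
        simp [hne, hofl]
      | cons y ys =>
        have := ih (cur := cur.push x) (by simp)
        simp only [List.foldl_cons, hstep] at this ⊢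
        rw [this]
        simp [hx, String.toList_push]
    · have hmem : ¬ x ∉ [',', '\n'] := by
        simp only [ndCh, delimCh, Bool.not_eq_true, Bool.not_eq_false'] at hx
        simp at hx ⊢
        rcases hx with hh | hh <;> simp [hh]
      have hstep : tokStep ([], cur) x = ([cur], "") := by
        simp only [tokStep]
        rw [if_neg hmem]
        rfl
      simp only [List.foldl_cons, hstep]
      obtain ⟨ts, c', hts⟩ := tokStep_mono xs [cur] ""
      simp only [hts]
      have hx' : ndCh x = false := by simpa using hx
      split
      · simp [hx', String.ofList_toList]
      · simp [hx', String.ofList_toList]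

-- find for a single-character needle is List.findIdx
theorem findChar (cs : List Char) (c : Char) :
    PySem.Chars.find cs [c] = if c ∈ cs then ((cs.findIdx (· == c) : Nat) : Int) else -1 := by
  by_cases hm : c ∈ cs
  · have hinf : [c] <:+: cs := (List.singleton_infix_iff c cs).mpr hm
    have h0 : 0 ≤ PySem.Chars.find cs [c] := (PySem.Chars.find_nonneg_iff cs [c]).mpr hinf
    obtain ⟨hpre, hmin⟩ := PySem.Chars.find_spec h0
    set k := (PySem.Chars.find cs [c]).toNat with hk
    have hpref : ∀ (j : Nat), ([c] <+: cs.drop j) ↔ cs[j]? = some c := by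
      intro j
      rw [← List.head?_drop]
      cases cs.drop j with
      | nil => simp
      | cons a l =>
        simp [List.cons_prefix_cons]
        exact eq_comm
    have hklt : k < cs.length := by
      by_contra hbig
      push Not at hbig
      have : cs.drop k = [] := List.drop_eq_nil_of_le hbig
      rw [this] at hpre
      simp at hpre
    have hck : cs[k]? = some c := (hpref k).mp hpre
    have hfi : cs.findIdx (· == c) = k := by
      rw [List.findIdx_eq hklt]
      constructor
      · have : cs[k] = c := by
          have := hck
          rw [List.getElem?_eq_getElem hklt] at this
          exact Option.some_injective _ this
        simp [this]
      · intro j hj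
        have hnp := hmin j hj
        rw [hpref j] at hnp
        by_contra hbad
        have hjlt : j < cs.length := lt_trans hj hklt
        simp only [Bool.not_eq_false] at hbad
        have : cs[j] = c := by simpa using hbad
        exact hnp (by rw [List.getElem?_eq_getElem hjlt, this])
    rw [if_pos hm, hfi, hk]
    omega
  · rw [if_neg hm]
    exact (PySem.Chars.find_eq_neg_one_iff cs [c]).mpr
      (fun hinf => hm ((List.singleton_infix_iff c cs).mp hinf))

theorem findIdx_or {α : Type} (p q : α → Bool) (l : List α) :
    l.findIdx (fun a => p a || q a) = min (l.findIdx p) (l.findIdx q) := by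
  induction l with
  | nil => simp
  | cons x xs ih =>
    simp only [List.findIdx_cons]
    cases hp : p x <;> cases hq : q x <;>
      simp only [Bool.false_or, Bool.true_or, Bool.or_self, cond_true, cond_false, ih] <;>
      omega

theorem findIdx_eq_length_of_not_mem (cs : List Char) (c : Char) (h : c ∉ cs) :
    cs.findIdx (· == c) = cs.length := by
  rw [List.findIdx_eq_length]
  intro x hx
  simp only [beq_eq_false_iff_ne, ne_eq]
  exact fun he => h (he ▸ hx)

-- arithmetic shape of B's cut computation
theorem pick_eq (n I J : Nat) (i j : Int) (hIle : I ≤ n) (hJle : J ≤ n)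
    (hi : i = (I : Int) ∨ (i = -1 ∧ I = n)) (hj : j = (J : Int) ∨ (j = -1 ∧ J = n)) :
    (if j ≠ -1 ∧ j < (if i ≠ -1 then i else (n : Int)) then j
     else (if i ≠ -1 then i else (n : Int))) = ((min I J : Nat) : Int) := by
  rcases hi with hi | ⟨hi, hIn⟩ <;> rcases hj with hj | ⟨hj, hJn⟩ <;> subst hi <;> subst hj <;>
    split_ifs <;> omega

-- B's first-field slice is A's first token
theorem primer_campo_eq (linea : String) :
    primer_campo linea = String.ofList (linea.toList.takeWhile ndCh) := by
  have hfind : ∀ c : Char, ∀ s : String, s.toList = [c] →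
      PySem.Str.find linea s =
        if c ∈ linea.toList then ((linea.toList.findIdx (· == c) : Nat) : Int) else -1 := by
    intro c s hs
    rw [PySem.Str.find_eq, hs, findChar]
  have hIle : linea.toList.findIdx (· == ',') ≤ linea.toList.length := List.findIdx_le_length
  have hJle : linea.toList.findIdx (· == '\n') ≤ linea.toList.length := List.findIdx_le_length
  have hki : linea.toList.findIdx (fun a => !ndCh a) =
      min (linea.toList.findIdx (· == ',')) (linea.toList.findIdx (· == '\n')) := by
    simp only [ndCh, delimCh, Bool.not_not]
    exact findIdx_or _ _ linea.toList
  have htake : linea.toList.takeWhile ndCh =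
      linea.toList.take (min (linea.toList.findIdx (· == ',')) (linea.toList.findIdx (· == '\n'))) := by
    rw [List.takeWhile_eq_take_findIdx_not, hki]
  apply String.toList_inj.mp
  simp only [primer_campo]
  rw [hfind ',' "," (by decide), hfind '\n' "\n" (by decide), PySem.Str.len_eq]
  rw [pick_eq linea.toList.length (linea.toList.findIdx (· == ',')) (linea.toList.findIdx (· == '\n'))
        _ _ hIle hJle
        (by by_cases hc : ',' ∈ linea.toList
            · left; rw [if_pos hc]
            · right; exact ⟨if_neg hc, findIdx_eq_length_of_not_mem _ _ hc⟩)
        (by by_cases hc : '\n' ∈ linea.toList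
            · left; rw [if_pos hc]
            · right; exact ⟨if_neg hc, findIdx_eq_length_of_not_mem _ _ hc⟩)]
  rw [htake]
  simp [PySem.Str.toList_slice, PySem.List.slice_to_natCast]

-- tokenization of a non-empty line: non-empty token list whose head is the first field
theorem tokenizar_head (linea : String) (h : linea ≠ "") :
    (tokenizar_linea_csv linea).head? = some (primer_campo linea) := by
  have hne : linea.toList ≠ [] := fun hc => h (String.toList_eq_nil_iff.mp hc)
  have := tok_first linea.toList "" hne
  rw [primer_campo_eq]
  simpa [tokenizar_eq] using this

theorem tokenizar_empty : tokenizar_linea_csv "" = [] := rfl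

-- the main fold invariant: B's list component equals A's accumulator,
-- B's set component is membership-equivalent to it
theorem fold_eq (lineas : List String) (lus : List String) (seen : PySem.Set String)
    (hinv : ∀ x, x ∈ seen ↔ x ∈ lus) :
    lineas.foldl
      (fun lus_unicos linea =>
        let datos := tokenizar_linea_csv linea
        if datos.length > 0 then
          let lu_actual := PySem.List.pyGetD datos 0 ""
          if lu_actual ∉ lus_unicos then lus_unicos ++ [lu_actual] else lus_unicos
        else lus_unicos)
      lus =
    (lineas.foldl
      (fun (st : PySem.Set String × List String) linea =>
        if linea = "" then st
        else
          let campo := primer_campo linea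
          if !st.1.contains campo then (st.1.add campo, st.2 ++ [campo]) else st)
      (seen, lus)).2 := by
  induction lineas generalizing lus seen with
  | nil => rfl
  | cons linea rest ih =>
    simp only [List.foldl_cons]
    by_cases hl : linea = ""
    · subst hl
      rw [if_pos rfl]
      have : tokenizar_linea_csv "" = [] := tokenizar_empty
      simp only [this, List.length_nil, gt_iff_lt, lt_self_iff_false, if_false]
      exact ih lus seen hinv
    · rw [if_neg hl]
      have hhead := tokenizar_head linea hl
      have hlen : (tokenizar_linea_csv linea).length > 0 := by
        cases hd : tokenizar_linea_csv linea with
        | nil => rw [hd] at hhead; simp at hhead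
        | cons a l => simp
      have hget : PySem.List.pyGetD (tokenizar_linea_csv linea) 0 "" = primer_campo linea := by
        rw [PySem.List.pyGetD_zero]
        cases hd : tokenizar_linea_csv linea with
        | nil => rw [hd] at hhead; simp at hhead
        | cons a l =>
          rw [hd] at hhead
          simp at hhead
          simp [hhead]
      simp only [if_pos hlen, hget]
      by_cases hmem : primer_campo linea ∈ lus
      · have hcont : seen.contains (primer_campo linea) = true :=
          (PySem.Set.contains_iff seen _).mpr ((hinv _).mpr hmem)
        rw [if_neg (by simpa using hmem)]
        simp only [hcont, Bool.not_true, Bool.false_eq_true, if_false]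
        exact ih lus seen hinv
      · have hcont : seen.contains (primer_campo linea) = false := by
          by_contra hc
          simp only [Bool.not_eq_false] at hc
          exact hmem ((hinv _).mp ((PySem.Set.contains_iff seen _).mp hc))
        rw [if_pos (by simpa using hmem)]
        simp only [hcont, Bool.not_false, if_true]
        refine ih (lus ++ [primer_campo linea]) (seen.add (primer_campo linea)) ?_
        intro x
        rw [PySem.Set.mem_add, List.mem_append, List.mem_singleton, hinv x]

-- ===== VERDICT (by name: the statement is the Claim_ definition above) =====
theorem obtener_lu_unico_spec : Claim_equal_obtener_lu_unico := by
  intro lineas _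
  show obtener_lu_unico lineas = obtener_lu_unico_alt lineas
  unfold obtener_lu_unico obtener_lu_unico_alt
  exact fold_eq lineas [] (PySem.Set.ofList []) (by simp)
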